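-- pv_equiv track=rewrite | github.com/Melody-Chung/NTUEE_girlsvolleyball_Web | app.py | sort_sections_by_saved_order
-- ===== SOURCE A (Python) =====
-- def sort_sections_by_saved_order(sections, order):
--     order_map = {str(section_id): index for index, section_id in enumerate(order or [])}
--     ordered_sections = []
--     remaining_sections = []
--     for section in sections:
--         if str(section.get("id")) in order_map:
--             ordered_sections.append(section)
--         else:
--             remaining_sections.append(section)
--     ordered_sections.sort(key=lambda section: order_map.get(str(section.get("id")), 0))
--     return ordered_sections + remaining_sections
-- ===== SOURCE B (Python) =====
-- def sort_sections_by_saved_order(sections, order):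
--     order_list = order or []
--     order_map = {str(section_id): index for index, section_id in enumerate(order_list)}
--     missing = len(order_list)
--     return sorted(sections, key=lambda section: order_map.get(str(section.get("id")), missing))
-- ===== Notes on version B (the rewrite author's own statement) =====
-- stated objective: simpler
-- what changed: Replaces the explicit partition into ordered/remaining lists plus a second sort-and-concatenate with a single stable sorted() call whose key sends unmatched sections to a sentinel (len(order_list)) strictly greater than every saved index, so stability reproduces the partition order.
import Mathlib
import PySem

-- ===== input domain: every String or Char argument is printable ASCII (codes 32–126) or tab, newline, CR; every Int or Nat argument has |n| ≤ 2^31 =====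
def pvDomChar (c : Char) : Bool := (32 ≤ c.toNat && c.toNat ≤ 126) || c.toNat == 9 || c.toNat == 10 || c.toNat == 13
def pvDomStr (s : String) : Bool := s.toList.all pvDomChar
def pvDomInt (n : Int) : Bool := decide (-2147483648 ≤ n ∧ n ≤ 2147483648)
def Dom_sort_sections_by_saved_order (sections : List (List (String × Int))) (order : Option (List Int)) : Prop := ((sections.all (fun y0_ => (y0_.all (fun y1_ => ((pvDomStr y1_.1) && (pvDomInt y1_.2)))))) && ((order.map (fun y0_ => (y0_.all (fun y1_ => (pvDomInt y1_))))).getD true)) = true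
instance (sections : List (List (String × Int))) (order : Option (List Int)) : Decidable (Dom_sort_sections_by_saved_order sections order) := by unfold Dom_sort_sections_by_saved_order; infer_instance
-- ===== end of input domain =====

-- B replaces A's explicit partition + sort + concatenate with one stable sort whose key
-- sends unmatched sections past every saved index (objective: simpler).
-- A mutates nothing the caller observes except sorting its own local list; the equivalence is about the return value.


-- ===== PORT A =====
-- str(section.get("id")): first-match lookup in the section's association list; a missing key is
-- Python's None, whose str() is "None" (hand-ported, exact: "None" is never str(int) of any id).
def pvKeyStr (sec : List (String × Int)) : String :=
  match (PySem.Dict.mk sec).get? "id" with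
  | some v => PySem.Int.toStr v
  | none => "None"

-- {str(section_id): index for index, section_id in enumerate(order or [])}  (shared by A and B verbatim)
def pvOrderMap (order_list : List Int) : PySem.Dict String Int :=
  (PySem.List.enumerate order_list).foldl
    (fun d p => d.insert (PySem.Int.toStr p.2) p.1) PySem.Dict.empty

def sort_sections_by_saved_order (sections : List (List (String × Int))) (order : Option (List Int)) : List (List (String × Int)) :=
  let order_map := pvOrderMap (order.getD [])
  let pr := sections.foldl
    (fun (acc : List (List (String × Int)) × List (List (String × Int))) sec =>
      if order_map.contains (pvKeyStr sec) then (acc.1 ++ [sec], acc.2)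
      else (acc.1, acc.2 ++ [sec]))
    ([], [])
  PySem.List.sorted pr.1 (fun sec => order_map.getD (pvKeyStr sec) 0) ++ pr.2

-- ===== PORT B =====
def sort_sections_by_saved_order_alt (sections : List (List (String × Int))) (order : Option (List Int)) : List (List (String × Int)) :=
  let order_list := order.getD []
  let order_map := pvOrderMap order_list
  let missing : Int := order_list.length
  PySem.List.sorted sections (fun sec => order_map.getD (pvKeyStr sec) missing)

-- ===== PRECONDITION & SPEC =====
def Spec_sort_sections_by_saved_order (sections : List (List (String × Int))) (order : Option (List Int)) (out : List (List (String × Int))) : Prop := out = sort_sections_by_saved_order_alt sections order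
instance (sections : List (List (String × Int))) (order : Option (List Int)) (out : List (List (String × Int))) : Decidable (Spec_sort_sections_by_saved_order sections order out) := by unfold Spec_sort_sections_by_saved_order; infer_instance

-- ===== CLAIM (what is proved, stated in full; the proofs are below) =====
def Claim_equal_sort_sections_by_saved_order : Prop := ∀ (sections : List (List (String × Int))) (order : Option (List Int)), Dom_sort_sections_by_saved_order sections order → Spec_sort_sections_by_saved_order sections order (sort_sections_by_saved_order sections order)

-- ===== LEMMAS AND PROOFS =====

-- every value stored by the order_map-building fold is < start + (number of entries folded in)
theorem pvOrderMap_val_lt_aux (l : List Int) : ∀ (s : Int) (d : PySem.Dict String Int),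
    (∀ k v, d.get? k = some v → v < s) →
    ∀ k v, ((PySem.List.enumerate l s).foldl
        (fun d p => d.insert (PySem.Int.toStr p.2) p.1) d).get? k = some v → v < s + l.length := by
  induction l with
  | nil => intro s d h k v hv; simpa using h k v (by simpa [PySem.List.enumerate] using hv)
  | cons x t ih =>
    intro s d h k v hv
    rw [PySem.List.enumerate_cons] at hv
    simp only [List.foldl_cons] at hv
    have h' : ∀ k v, (d.insert (PySem.Int.toStr x) s).get? k = some v → v < s + 1 := by
      intro k v hkv
      by_cases hk : k = PySem.Int.toStr x
      · subst hk; rw [PySem.Dict.get?_insert_self] at hkv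
        cases hkv; omega
      · rw [PySem.Dict.get?_insert_of_ne _ _ hk] at hkv
        have := h k v hkv; omega
    have := ih (s + 1) _ h' k v hv
    simp only [List.length_cons] at *
    push_cast at *; omega

theorem pvOrderMap_val_lt (ol : List Int) (k : String) (v : Int)
    (h : (pvOrderMap ol).get? k = some v) : v < (ol.length : Int) := by
  have h0 : ∀ k v, (PySem.Dict.empty (κ := String) (ν := Int)).get? k = some v → v < (0 : Int) := by
    intro k v hv; simp [PySem.Dict.empty, PySem.Dict.get?] at hv
  have := pvOrderMap_val_lt_aux ol 0 PySem.Dict.empty h0 k v (by simpa [pvOrderMap] using h)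
  simpa using this

theorem pvContains_iff {κ ν : Type} [BEq κ] (d : PySem.Dict κ ν) (k : κ) :
    d.contains k = true ↔ ∃ v, d.get? k = some v := by
  rw [PySem.Dict.contains, PySem.Dict.get?, List.any_eq_true]
  constructor
  · rintro ⟨x, hx, hk⟩
    have h : (d.items.find? (fun p => p.1 == k)).isSome := List.find?_isSome.mpr ⟨x, hx, hk⟩
    rcases Option.isSome_iff_exists.mp h with ⟨q, hq⟩
    exact ⟨q.2, by simp [hq]⟩
  · rintro ⟨v, hv⟩
    rcases Option.map_eq_some_iff.mp hv with ⟨q, hq, _⟩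
    have h2 : (fun p : κ × ν => p.1 == k) q = true := List.find?_some (p := fun p : κ × ν => p.1 == k) hq
    exact ⟨q, List.mem_of_find?_eq_some hq, h2⟩

theorem pvInsertBy_append_of_before {α : Type} (before : α → α → Bool) (x : α) :
    ∀ (ys zs : List α), (∀ z ∈ zs, before x z = true) →
      PySem.List.insertBy before x (ys ++ zs) = PySem.List.insertBy before x ys ++ zs := by
  intro ys
  induction ys with
  | nil =>
    intro zs hz
    cases zs with
    | nil => rfl
    | cons z zs' => simp [PySem.List.insertBy, hz z (by simp)]
  | cons y ys' ih =>
    intro zs hz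
    by_cases hy : before x y = true
    · simp [PySem.List.insertBy, hy]
    · simp only [Bool.not_eq_true] at hy
      simp [PySem.List.insertBy, hy, ih zs hz]

theorem pvInsertBy_congr {α : Type} (b1 b2 : α → α → Bool) (x : α) :
    ∀ (ys : List α), (∀ y ∈ ys, b1 x y = b2 x y) →
      PySem.List.insertBy b1 x ys = PySem.List.insertBy b2 x ys := by
  intro ys
  induction ys with
  | nil => intro _; rfl
  | cons y ys' ih =>
    intro h
    have hy := h y (by simp)
    by_cases hb : b1 x y = true
    · simp [PySem.List.insertBy, hb, hy ▸ hb]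
    · simp only [Bool.not_eq_true] at hb
      simp [PySem.List.insertBy, hb, hy ▸ hb, ih (fun z hz => h z (by simp [hz]))]

theorem pvSorted_key_congr {α : Type} (k1 k2 : α → Int) :
    ∀ (xs : List α), (∀ x ∈ xs, k1 x = k2 x) →
      PySem.List.sorted xs k1 = PySem.List.sorted xs k2 := by
  intro xs
  induction xs using List.reverseRecOn with
  | nil => intro _; rfl
  | append_singleton l x ih =>
    intro h
    rw [PySem.List.sorted_eq_foldl_insertBy, PySem.List.sorted_eq_foldl_insertBy,
      List.foldl_append, List.foldl_append]
    simp only [List.foldl_cons, List.foldl_nil]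
    rw [← PySem.List.sorted_eq_foldl_insertBy, ← PySem.List.sorted_eq_foldl_insertBy,
      ih (fun y hy => h y (by simp [hy]))]
    apply pvInsertBy_congr
    intro y hy
    have hyl : y ∈ l := (PySem.List.mem_sorted _ _ _ _).mp hy
    rw [h x (by simp), h y (by simp [hyl])]

-- the stable sort splits along any predicate p that separates keys: p-elements all have
-- key < n and come out sorted first; non-p elements all have key = n and keep their order
theorem pvSorted_split {α : Type} (k : α → Int) (n : Int) (p : α → Bool)
    (hp : ∀ x, (p x = true → k x < n) ∧ (p x = false → k x = n)) :
    ∀ (secs : List α),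
      PySem.List.sorted secs k =
        PySem.List.sorted (secs.filter p) k ++ secs.filter (fun s => !p s) := by
  intro secs
  induction secs using List.reverseRecOn with
  | nil => rfl
  | append_singleton l x ih =>
    rw [PySem.List.sorted_eq_foldl_insertBy, List.foldl_append]
    simp only [List.foldl_cons, List.foldl_nil]
    rw [← PySem.List.sorted_eq_foldl_insertBy, ih]
    by_cases hx : p x = true
    · rw [pvInsertBy_append_of_before]
      · have hfp : (l ++ [x]).filter p = l.filter p ++ [x] := by
          simp [List.filter_append, hx]
        have hfn : (l ++ [x]).filter (fun s => !p s) = l.filter (fun s => !p s) := by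
          simp [List.filter_append, hx]
        rw [hfp, hfn,
          PySem.List.sorted_eq_foldl_insertBy (l.filter p ++ [x]), List.foldl_append]
        simp only [List.foldl_cons, List.foldl_nil]
        rw [← PySem.List.sorted_eq_foldl_insertBy]
      · intro z hz
        rw [List.mem_filter] at hz
        have hz2 : p z = false := by simpa using hz.2
        have := (hp z).2 hz2
        have := (hp x).1 hx
        simp only [decide_eq_true_eq]; omega
    · simp only [Bool.not_eq_true] at hx
      rw [PySem.List.insertBy_of_forall_not_before]
      · have hfp : (l ++ [x]).filter p = l.filter p := by
          simp [List.filter_append, hx]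
        have hfn : (l ++ [x]).filter (fun s => !p s) = l.filter (fun s => !p s) ++ [x] := by
          simp [List.filter_append, hx]
        rw [hfp, hfn, List.append_assoc]
      · intro y hy
        have hkx := (hp x).2 hx
        have hky : k y ≤ n := by
          have hmem : y ∈ PySem.List.sorted (l.filter p) k ∨ y ∈ l.filter (fun s => !p s) :=
            List.mem_append.mp hy
          rcases hmem with hm | hm
          · have : y ∈ l.filter p := (PySem.List.mem_sorted _ _ _ _).mp hm
            rw [List.mem_filter] at this
            have := (hp y).1 this.2; omega
          · rw [List.mem_filter] at hm
            have : p y = false := by simpa using hm.2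
            have := (hp y).2 this; omega
        simp only [decide_eq_false_iff_not, not_lt]; omega

-- A's partition loop is (acc.1 ++ filter p, acc.2 ++ filter !p)
theorem pvPartition_foldl {α : Type} (p : α → Bool) :
    ∀ (secs : List α) (o r : List α),
      secs.foldl (fun (acc : List α × List α) s =>
          if p s then (acc.1 ++ [s], acc.2) else (acc.1, acc.2 ++ [s])) (o, r) =
        (o ++ secs.filter p, r ++ secs.filter (fun s => !p s)) := by
  intro secs
  induction secs with
  | nil => intro o r; simp
  | cons x t ih =>
    intro o r
    by_cases hx : p x = true
    · simp [List.foldl_cons, hx, ih]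
    · simp only [Bool.not_eq_true] at hx
      simp [List.foldl_cons, hx, ih]

-- ===== VERDICT (by name: the statement is the Claim_ definition above) =====
theorem sort_sections_by_saved_order_spec : Claim_equal_sort_sections_by_saved_order := by
  intro sections order _
  unfold Spec_sort_sections_by_saved_order
  unfold sort_sections_by_saved_order sort_sections_by_saved_order_alt
  simp only []
  set ol := order.getD [] with hol
  set om := pvOrderMap ol with hom
  set n : Int := (ol.length : Int) with hn
  set p : List (String × Int) → Bool := fun s => om.contains (pvKeyStr s) with hpdef
  set kB : List (String × Int) → Int := fun s => om.getD (pvKeyStr s) n with hkB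
  have hp : ∀ x, (p x = true → kB x < n) ∧ (p x = false → kB x = n) := by
    intro x
    constructor
    · intro hx
      rcases (pvContains_iff om (pvKeyStr x)).mp hx with ⟨v, hv⟩
      have := pvOrderMap_val_lt ol _ _ (hom ▸ hv)
      simp [hkB, PySem.Dict.getD, hv]; omega
    · intro hx
      have : om.get? (pvKeyStr x) = none := by
        by_contra hne
        rcases Option.ne_none_iff_exists'.mp hne with ⟨v, hv⟩
        have := (pvContains_iff om (pvKeyStr x)).mpr ⟨v, hv⟩
        rw [hpdef] at hx; simp_all
      simp [hkB, PySem.Dict.getD, this]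
  rw [pvPartition_foldl p sections [] []]
  simp only [List.nil_append]
  rw [pvSorted_split kB n p hp sections]
  congr 1
  apply pvSorted_key_congr
  intro x hx
  rw [List.mem_filter] at hx
  rcases (pvContains_iff om (pvKeyStr x)).mp hx.2 with ⟨v, hv⟩
  simp [PySem.Dict.getD, hv, hkB]
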